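-- pv_equiv track=rewrite | github.com/BTCElectrician/ohmni-oracle-v3 | services/extraction/plumbing.py | _prioritize_plumbing_tables
-- ===== SOURCE A (Python) =====
-- from typing import List, Dict, Any, Optional
--
-- def _prioritize_plumbing_tables(
--     tables: List[Dict[str, Any]]
-- ) -> List[Dict[str, Any]]:
--     """Prioritize plumbing tables - fixture schedules first."""
--     # Focus on just a few critical keywords for scoring tables
--     fixture_tables = []
--     equipment_tables = []
--     pipe_tables = []
--     other_tables = []
--
--     for table in tables:
--         content = table.get("content", "").lower()
--
--         # Check for just the most important keywords
--         if any(
--             term in content for term in ["fixture", "wc", "lav", "sink", "urinal"]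
--         ):
--             fixture_tables.append(table)
--         elif any(
--             term in content
--             for term in ["water heater", "pump", "water temperature"]
--         ):
--             equipment_tables.append(table)
--         elif any(term in content for term in ["pipe", "valve", "fitting"]):
--             pipe_tables.append(table)
--         else:
--             other_tables.append(table)
--
--     # Return prioritized tables - most important first
--     return fixture_tables + equipment_tables + pipe_tables + other_tables
-- ===== SOURCE B (Python) =====
-- def _prioritize_plumbing_tables(tables):
--     """Prioritize plumbing tables - fixture schedules first."""
--     def _rank(table):
--         content = table.get("content", "").lower()
--         if any(term in content for term in ["fixture", "wc", "lav", "sink", "urinal"]):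
--             return 0
--         if any(term in content for term in ["water heater", "pump", "water temperature"]):
--             return 1
--         if any(term in content for term in ["pipe", "valve", "fitting"]):
--             return 2
--         return 3
--     return sorted(tables, key=_rank)
-- ===== Notes on version B (the rewrite author's own statement) =====
-- stated objective: idiomatic
-- what changed: Replaces the four explicit bucket lists and their concatenation with a rank key function and a single stable sort (sorted(tables, key=rank)), whose stability preserves the intra-category input order.
import Mathlib
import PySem

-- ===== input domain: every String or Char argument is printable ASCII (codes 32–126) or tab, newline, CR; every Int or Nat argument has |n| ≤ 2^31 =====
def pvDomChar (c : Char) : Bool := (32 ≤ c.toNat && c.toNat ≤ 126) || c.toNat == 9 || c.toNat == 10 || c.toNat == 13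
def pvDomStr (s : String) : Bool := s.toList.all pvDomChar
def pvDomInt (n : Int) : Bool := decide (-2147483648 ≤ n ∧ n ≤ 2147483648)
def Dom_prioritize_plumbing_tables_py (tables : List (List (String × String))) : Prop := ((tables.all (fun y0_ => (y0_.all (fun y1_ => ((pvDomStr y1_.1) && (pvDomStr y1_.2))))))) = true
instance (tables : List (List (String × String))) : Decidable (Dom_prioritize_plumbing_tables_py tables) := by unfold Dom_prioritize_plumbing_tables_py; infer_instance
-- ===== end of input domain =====

-- B replaces A's four explicit bucket lists + concatenation by a rank key and one stable sort (same return value; no mutation involved).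


-- shared helpers: `table.get("content", "").lower()` and `any(term in content for term in terms)`
def pvContent (table : List (String × String)) : String :=
  PySem.Str.lower ((table.lookup "content").getD "")

def pvAnyIn (terms : List String) (content : String) : Bool :=
  terms.any (fun term => PySem.Str.isIn term content)

-- ===== PORT A =====
-- one pass appending each table to one of four bucket lists, then concatenation
def pvStepA (acc : List (List (String × String)) × List (List (String × String)) × List (List (String × String)) × List (List (String × String)))
    (table : List (String × String)) :
    List (List (String × String)) × List (List (String × String)) × List (List (String × String)) × List (List (String × String)) :=
  if pvAnyIn ["fixture", "wc", "lav", "sink", "urinal"] (pvContent table) then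
    (acc.1 ++ [table], acc.2.1, acc.2.2.1, acc.2.2.2)
  else if pvAnyIn ["water heater", "pump", "water temperature"] (pvContent table) then
    (acc.1, acc.2.1 ++ [table], acc.2.2.1, acc.2.2.2)
  else if pvAnyIn ["pipe", "valve", "fitting"] (pvContent table) then
    (acc.1, acc.2.1, acc.2.2.1 ++ [table], acc.2.2.2)
  else
    (acc.1, acc.2.1, acc.2.2.1, acc.2.2.2 ++ [table])

def prioritize_plumbing_tables_py (tables : List (List (String × String))) : List (List (String × String)) :=
  let r := tables.foldl pvStepA ([], [], [], [])
  r.1 ++ r.2.1 ++ r.2.2.1 ++ r.2.2.2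

-- ===== PORT B =====
-- a rank key (same cascade of keyword tests) and one stable sort
def pvRank (table : List (String × String)) : Nat :=
  if pvAnyIn ["fixture", "wc", "lav", "sink", "urinal"] (pvContent table) then 0
  else if pvAnyIn ["water heater", "pump", "water temperature"] (pvContent table) then 1
  else if pvAnyIn ["pipe", "valve", "fitting"] (pvContent table) then 2
  else 3

def prioritize_plumbing_tables_py_alt (tables : List (List (String × String))) : List (List (String × String)) :=
  PySem.List.sorted tables pvRank

-- ===== PRECONDITION & SPEC =====
def Spec_prioritize_plumbing_tables_py (tables : List (List (String × String))) (out : List (List (String × String))) : Prop := out = prioritize_plumbing_tables_py_alt tables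
instance (tables : List (List (String × String))) (out : List (List (String × String))) : Decidable (Spec_prioritize_plumbing_tables_py tables out) := by unfold Spec_prioritize_plumbing_tables_py; infer_instance

-- ===== CLAIM (what is proved, stated in full; the proofs are below) =====
def Claim_equal_prioritize_plumbing_tables_py : Prop := ∀ (tables : List (List (String × String))), Dom_prioritize_plumbing_tables_py tables → Spec_prioritize_plumbing_tables_py tables (prioritize_plumbing_tables_py tables)

-- ===== LEMMAS AND PROOFS =====

-- A's loop: each bucket collects exactly the tables of its rank, in input order.
theorem pv_loopA (ts : List (List (String × String)))
    (f e p o : List (List (String × String))) :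
    ts.foldl pvStepA (f, e, p, o) =
      (f ++ ts.filter (fun t => pvRank t == 0),
       e ++ ts.filter (fun t => pvRank t == 1),
       p ++ ts.filter (fun t => pvRank t == 2),
       o ++ ts.filter (fun t => pvRank t == 3)) := by
  induction ts generalizing f e p o with
  | nil => simp
  | cons t ts ih =>
    by_cases h0 : pvAnyIn ["fixture", "wc", "lav", "sink", "urinal"] (pvContent t) = true
    · simp [pvStepA, pvRank, h0, ih]
    · by_cases h1 : pvAnyIn ["water heater", "pump", "water temperature"] (pvContent t) = true
      · simp [pvStepA, pvRank, h0, h1, ih]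
      · by_cases h2 : pvAnyIn ["pipe", "valve", "fitting"] (pvContent t) = true
        · simp [pvStepA, pvRank, h0, h1, h2, ih]
        · simp [pvStepA, pvRank, h0, h1, h2, ih]

-- insertBy drops past a prefix it does not go before and lands in front of a suffix it goes before everywhere.
theorem pv_insertBy_middle {α : Type} (before : α → α → Bool) (x : α)
    (l1 l2 : List α) (h1 : ∀ y ∈ l1, before x y = false)
    (h2 : ∀ y ∈ l2, before x y = true) :
    PySem.List.insertBy before x (l1 ++ l2) = l1 ++ x :: l2 := by
  induction l1 with
  | nil =>
    cases l2 with
    | nil => simp [PySem.List.insertBy]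
    | cons y ys => simp [PySem.List.insertBy, h2 y (by simp)]
  | cons a l1 ih =>
    simp only [List.cons_append, PySem.List.insertBy, h1 a (by simp)]
    simp only [Bool.false_eq_true, if_false, List.cons.injEq, true_and]
    exact ih (fun y hy => h1 y (by simp [hy]))

-- every table has rank 0, 1, 2 or 3
theorem pv_rank_lt_four (t : List (String × String)) : pvRank t < 4 := by
  unfold pvRank; split_ifs <;> omega

-- appending one more table of rank r to a bucket of rank-r tables
theorem pv_bucket_snoc {r : Nat} {l : List (List (String × String))} {x : List (String × String)}
    (hl : ∀ y ∈ l, pvRank y = r) (hx : pvRank x = r) : ∀ y ∈ l ++ [x], pvRank y = r := by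
  intro y hy
  rcases List.mem_append.1 hy with hy | hy
  · exact hl y hy
  · simp only [List.mem_singleton] at hy
    simpa [hy] using hx

-- B's insertion-sort fold preserves the bucketed shape: inserting x appends it to the end of its rank's bucket.
set_option maxHeartbeats 800000 in
theorem pv_loopB (ts : List (List (String × String)))
    (f e p o : List (List (String × String)))
    (hf : ∀ y ∈ f, pvRank y = 0) (he : ∀ y ∈ e, pvRank y = 1)
    (hp : ∀ y ∈ p, pvRank y = 2) (ho : ∀ y ∈ o, pvRank y = 3) :
    ts.foldl (fun acc x => PySem.List.insertBy (fun a b => decide (pvRank a < pvRank b)) x acc)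
      (f ++ e ++ p ++ o) =
      (f ++ ts.filter (fun t => pvRank t == 0)) ++
      (e ++ ts.filter (fun t => pvRank t == 1)) ++
      (p ++ ts.filter (fun t => pvRank t == 2)) ++
      (o ++ ts.filter (fun t => pvRank t == 3)) := by
  induction ts generalizing f e p o with
  | nil => simp
  | cons t ts ih =>
    have h4 := pv_rank_lt_four t
    simp only [List.foldl_cons]
    interval_cases h : pvRank t
    · -- rank 0: t goes to the front bucket
      have hpre : ∀ y ∈ f, (fun a b => decide (pvRank a < pvRank b)) t y = false := by
        intro y hy; simp [h, hf y hy]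
      have hsuf : ∀ y ∈ e ++ p ++ o, (fun a b => decide (pvRank a < pvRank b)) t y = true := by
        intro y hy
        simp only [List.append_assoc, List.mem_append] at hy
        rcases hy with hy | hy | hy
        · simp [h, he y hy]
        · simp [h, hp y hy]
        · simp [h, ho y hy]
      have hins := pv_insertBy_middle (fun a b => decide (pvRank a < pvRank b)) t f (e ++ p ++ o) hpre
        (by simpa [List.append_assoc] using hsuf)
      rw [show f ++ e ++ p ++ o = f ++ (e ++ p ++ o) from by simp, hins,
        show f ++ t :: (e ++ p ++ o) = (f ++ [t]) ++ e ++ p ++ o from by simp,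
        ih (f ++ [t]) e p o (pv_bucket_snoc hf h) he hp ho]
      simp [h]
    · -- rank 1
      have hpre : ∀ y ∈ f ++ e, (fun a b => decide (pvRank a < pvRank b)) t y = false := by
        intro y hy
        rcases List.mem_append.1 hy with hy | hy
        · simp [h, hf y hy]
        · simp [h, he y hy]
      have hsuf : ∀ y ∈ p ++ o, (fun a b => decide (pvRank a < pvRank b)) t y = true := by
        intro y hy
        rcases List.mem_append.1 hy with hy | hy
        · simp [h, hp y hy]
        · simp [h, ho y hy]
      have hins := pv_insertBy_middle (fun a b => decide (pvRank a < pvRank b)) t (f ++ e) (p ++ o) hpre hsuf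
      rw [show f ++ e ++ p ++ o = (f ++ e) ++ (p ++ o) from by simp, hins,
        show (f ++ e) ++ t :: (p ++ o) = f ++ (e ++ [t]) ++ p ++ o from by simp,
        ih f (e ++ [t]) p o hf (pv_bucket_snoc he h) hp ho]
      simp [h]
    · -- rank 2
      have hpre : ∀ y ∈ f ++ e ++ p, (fun a b => decide (pvRank a < pvRank b)) t y = false := by
        intro y hy
        simp only [List.append_assoc, List.mem_append] at hy
        rcases hy with hy | hy | hy
        · simp [h, hf y hy]
        · simp [h, he y hy]
        · simp [h, hp y hy]
      have hsuf : ∀ y ∈ o, (fun a b => decide (pvRank a < pvRank b)) t y = true := by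
        intro y hy; simp [h, ho y hy]
      have hins := pv_insertBy_middle (fun a b => decide (pvRank a < pvRank b)) t (f ++ e ++ p) o hpre hsuf
      rw [show f ++ e ++ p ++ o = (f ++ e ++ p) ++ o from by simp, hins,
        show (f ++ e ++ p) ++ t :: o = f ++ e ++ (p ++ [t]) ++ o from by simp,
        ih f e (p ++ [t]) o hf he (pv_bucket_snoc hp h) ho]
      simp [h]
    · -- rank 3: t never goes before anything, so it lands at the very end
      have hpre : ∀ y ∈ f ++ e ++ p ++ o, (fun a b => decide (pvRank a < pvRank b)) t y = false := by
        intro y hy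
        simp only [List.append_assoc, List.mem_append] at hy
        rcases hy with hy | hy | hy | hy
        · simp [h, hf y hy]
        · simp [h, he y hy]
        · simp [h, hp y hy]
        · simp [h, ho y hy]
      rw [PySem.List.insertBy_of_forall_not_before (fun a b => decide (pvRank a < pvRank b)) t (f ++ e ++ p ++ o) hpre,
        show (f ++ e ++ p ++ o) ++ [t] = f ++ e ++ p ++ (o ++ [t]) from by simp,
        ih f e p (o ++ [t]) hf he hp (pv_bucket_snoc ho h)]
      simp [h]

-- ===== VERDICT (by name: the statement is the Claim_ definition above) =====
theorem prioritize_plumbing_tables_py_spec : Claim_equal_prioritize_plumbing_tables_py := by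
  intro tables _
  show prioritize_plumbing_tables_py tables = prioritize_plumbing_tables_py_alt tables
  unfold prioritize_plumbing_tables_py prioritize_plumbing_tables_py_alt
  rw [PySem.List.sorted_eq_foldl_insertBy]
  rw [show ([] : List (List (String × String))) = [] ++ [] ++ [] ++ [] by simp,
    pv_loopB tables [] [] [] [] (by simp) (by simp) (by simp) (by simp)]
  simp [pv_loopA tables [] [] [] []]
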